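-- pv_equiv track=rewrite | github.com/masapeace/focus-ring | app/summarizer.py | calculate_context_switches
-- ===== SOURCE A (Python) =====
-- from typing import List, Tuple, Dict, Optional
--
-- def calculate_context_switches(categories: List[str]) -> int:
--     """
--     カテゴリ切替回数を計算
--
--     Args:
--         categories: カテゴリのリスト（時系列順）
--
--     Returns:
--         切替回数
--     """
--     if len(categories) <= 1:
--         return 0
--
--     switches = 0
--     for i in range(1, len(categories)):
--         if categories[i] != categories[i-1]:
--             switches += 1
--
--     return switches
-- ===== SOURCE B (Python) =====
-- from itertools import groupby
--
-- def calculate_context_switches(categories):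
--     groups = sum(1 for _ in groupby(categories))
--     return max(groups - 1, 0)
-- ===== Notes on version B (the rewrite author's own statement) =====
-- stated objective: idiomatic
-- what changed: B counts maximal runs of equal consecutive values with itertools.groupby and returns max(runs - 1, 0) instead of A's index loop incrementing a counter per adjacent-pair comparison.
import Mathlib
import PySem

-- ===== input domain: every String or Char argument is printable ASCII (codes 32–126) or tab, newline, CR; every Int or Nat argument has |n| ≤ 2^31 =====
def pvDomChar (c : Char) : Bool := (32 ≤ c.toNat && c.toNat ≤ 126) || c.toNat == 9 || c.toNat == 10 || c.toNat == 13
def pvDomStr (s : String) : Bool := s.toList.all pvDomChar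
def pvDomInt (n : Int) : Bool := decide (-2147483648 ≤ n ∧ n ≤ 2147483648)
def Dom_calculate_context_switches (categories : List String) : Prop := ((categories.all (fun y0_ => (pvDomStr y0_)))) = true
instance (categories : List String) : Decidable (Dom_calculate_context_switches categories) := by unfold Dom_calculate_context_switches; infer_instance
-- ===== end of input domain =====

-- B counts maximal runs of equal consecutive values (itertools.groupby) and returns max(runs-1, 0);
-- A increments a counter per adjacent unequal pair. Objective: a more idiomatic decomposition; equal return values proved below.

-- ===== PORT A =====
-- indices i in range(1, len) are always in range, so pyGetD with default "" is exact
def calculate_context_switches (categories : List String) : Int :=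
  if categories.length ≤ 1 then 0
  else
    (PySem.List.pyRange 1 (categories.length : Int) 1).foldl
      (fun switches i =>
        if PySem.List.pyGetD categories i "" ≠ PySem.List.pyGetD categories (i - 1) "" then
          switches + 1
        else switches) 0

-- ===== PORT B =====
-- groupby(categories) yields one group per maximal run of equal consecutive elements;
-- pvGroups counts those runs: each step consumes the head's run via dropWhile.
def pvGroups : List String → Int
  | [] => 0
  | a :: rest => 1 + pvGroups (rest.dropWhile (· == a))
termination_by l => l.length
decreasing_by
  exact Nat.lt_succ_of_le (List.length_dropWhile_le _ rest)

def calculate_context_switches_alt (categories : List String) : Int :=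
  max (pvGroups categories - 1) 0

-- ===== PRECONDITION & SPEC =====
def Spec_calculate_context_switches (categories : List String) (out : Int) : Prop := out = calculate_context_switches_alt categories
instance (categories : List String) (out : Int) : Decidable (Spec_calculate_context_switches categories out) := by unfold Spec_calculate_context_switches; infer_instance

-- ===== CLAIM (what is proved, stated in full; the proofs are below) =====
def Claim_equal_calculate_context_switches : Prop := ∀ (categories : List String), Dom_calculate_context_switches categories → Spec_calculate_context_switches categories (calculate_context_switches categories)

-- ===== LEMMAS AND PROOFS =====

-- ===== VERDICT (by name: the statement is the Claim_ definition above) =====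
-- switches l = number of adjacent unequal pairs in l (common characterisation of both ports)
def pvSwitches : List String → Int
  | a :: b :: t => (if b ≠ a then (1 : Int) else 0) + pvSwitches (b :: t)
  | _ => 0

lemma pvSwitches_nonneg : ∀ l : List String, 0 ≤ pvSwitches l
  | [] => le_refl 0
  | [_] => le_refl 0
  | _ :: b :: t => by
      have := pvSwitches_nonneg (b :: t)
      simp only [pvSwitches]
      split_ifs <;> omega

lemma foldA (m : Nat) : ∀ (l : List String) (k : Nat) (acc : Int), l.length - k = m → k < l.length →
    (PySem.List.pyRange ((k : Int) + 1) (l.length : Int) 1).foldl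
      (fun switches i =>
        if PySem.List.pyGetD l i "" ≠ PySem.List.pyGetD l (i - 1) "" then switches + 1
        else switches) acc = acc + pvSwitches (l.drop k) := by
  induction m with
  | zero => intro l k acc hm hk; omega
  | succ m ih =>
    intro l k acc hm hk
    by_cases h1 : k + 1 < l.length
    · have e1 : ((k : Int) + 1) = ((k + 1 : Nat) : Int) := by push_cast; ring
      rw [PySem.List.pyRange_one_cons (by exact_mod_cast h1), List.foldl_cons]
      have e2 : ((k : Int) + 1 + 1) = (((k + 1 : Nat) : Int) + 1) := by push_cast; ring
      rw [e2, ih l (k + 1) _ (by omega) h1]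
      have gA : PySem.List.pyGetD l ((k : Int) + 1) "" = l[k + 1] := by
        rw [e1, PySem.List.pyGetD_natCast, List.getD_eq_getElem l "" h1]
      have gB : PySem.List.pyGetD l ((k : Int) + 1 - 1) "" = l[k] := by
        rw [show ((k : Int) + 1 - 1) = ((k : Nat) : Int) by ring,
          PySem.List.pyGetD_natCast, List.getD_eq_getElem l "" hk]
      rw [gA, gB]
      have hd : l.drop k = l[k] :: l.drop (k + 1) := List.drop_eq_getElem_cons hk
      have hd2 : l.drop (k + 1) = l[k + 1] :: l.drop (k + 2) := List.drop_eq_getElem_cons h1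
      rw [hd, hd2, pvSwitches]
      generalize pvSwitches (l[k + 1] :: l.drop (k + 2)) = P
      split_ifs <;> omega
    · have hk1 : l.length = k + 1 := by omega
      rw [PySem.List.pyRange_one_eq_nil (by omega)]
      have : l.drop k = [l[k]] := by
        rw [List.drop_eq_getElem_cons hk, List.drop_eq_nil_of_le (by omega)]
      simp [this, pvSwitches]

lemma groupsB : ∀ (rest : List String) (a : String),
    pvGroups (a :: rest) = pvSwitches (a :: rest) + 1 := by
  intro rest
  induction rest with
  | nil => intro a; simp [pvGroups, pvSwitches]
  | cons b t ih =>
    intro a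
    by_cases hba : b = a
    · subst hba
      have h1 : pvGroups (b :: b :: t) = pvGroups (b :: t) := by
        conv_lhs => rw [pvGroups]
        conv_rhs => rw [pvGroups]
        rw [List.dropWhile_cons_of_pos (by simp)]
      rw [h1, ih b]
      simp [pvSwitches]
    · have h1 : pvGroups (a :: b :: t) = 1 + pvGroups (b :: t) := by
        conv_lhs => rw [pvGroups]
        rw [List.dropWhile_cons_of_neg (by simp [hba])]
      rw [h1, ih b]
      have : pvSwitches (a :: b :: t) = 1 + pvSwitches (b :: t) := by
        simp [pvSwitches, hba]
      omega

theorem calculate_context_switches_spec : Claim_equal_calculate_context_switches := by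
  intro l _
  unfold Spec_calculate_context_switches calculate_context_switches calculate_context_switches_alt
  match l with
  | [] => simp [pvGroups]
  | [a] => simp [pvGroups, List.dropWhile]
  | a :: b :: t =>
    have hlen : ¬ (a :: b :: t).length ≤ 1 := by simp
    rw [if_neg hlen]
    have h := foldA ((a :: b :: t).length - 0) (a :: b :: t) 0 0 rfl (by simp)
    simp only [Nat.cast_zero, zero_add, List.drop_zero] at h
    rw [h, groupsB]
    have := pvSwitches_nonneg (a :: b :: t)
    omega
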